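-- pv_equiv track=rewrite | github.com/AyeVedya/bin | prac2.py | linCom
-- ===== SOURCE A (Python) =====
-- def scalMul(x, p):
--     return [x[i] * p for i in range(len(x))]
--
-- def linCom(vlist, clist):
--     s = [scalMul(vlist[i], clist[i]) for i in range(len(vlist))]
--     l = []
--     for j in range(len(s[0])):
--         su = 0
--         for i in range(len(s)):
--             su = su + s[i][j]
--         l.append(su)
--     return l
-- ===== SOURCE B (Python) =====
-- def linCom(vlist, clist):
--     result = [0] * len(vlist[0])
--     for i in range(len(vlist)):
--         c = clist[i]
--         v = vlist[i]
--         result = [result[j] + v[j] * c for j in range(len(result))]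
--     return result
-- ===== Notes on version B (the rewrite author's own statement) =====
-- stated objective: simpler
-- what changed: B keeps one running accumulator vector updated in a single pass over vlist instead of materializing the whole scaled matrix and then summing each column with a nested index loop.
import Mathlib
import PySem

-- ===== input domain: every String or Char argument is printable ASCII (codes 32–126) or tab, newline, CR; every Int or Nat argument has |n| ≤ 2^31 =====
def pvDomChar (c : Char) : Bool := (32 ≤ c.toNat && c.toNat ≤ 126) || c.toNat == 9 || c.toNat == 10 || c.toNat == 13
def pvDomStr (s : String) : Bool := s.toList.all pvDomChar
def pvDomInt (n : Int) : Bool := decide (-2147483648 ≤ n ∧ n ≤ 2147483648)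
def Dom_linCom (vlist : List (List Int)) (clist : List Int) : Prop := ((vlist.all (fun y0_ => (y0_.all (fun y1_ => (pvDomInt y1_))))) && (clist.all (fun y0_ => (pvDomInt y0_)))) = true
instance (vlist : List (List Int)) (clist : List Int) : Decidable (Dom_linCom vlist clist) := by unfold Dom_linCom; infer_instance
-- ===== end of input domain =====

-- B replaces A's "build the scaled matrix, then sum each column" with a single pass
-- keeping one running accumulator vector (objective: simpler).


-- ===== PORT A =====
def scalMulL (x : List Int) (p : Int) : List Int :=
  (List.range x.length).map (fun i => x.getD i 0 * p)

def linCom (vlist : List (List Int)) (clist : List Int) : List Int :=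
  let s := (List.range vlist.length).map (fun i => scalMulL (vlist.getD i []) (clist.getD i 0))
  (List.range (s.headD []).length).map (fun j =>
    (List.range s.length).foldl (fun su i => su + (s.getD i []).getD j 0) 0)

-- ===== PORT B =====
def linCom_alt (vlist : List (List Int)) (clist : List Int) : List Int :=
  (List.range vlist.length).foldl
    (fun result i =>
      let c := clist.getD i 0
      let v := vlist.getD i []
      (List.range result.length).map (fun j => result.getD j 0 + v.getD j 0 * c))
    (List.replicate (vlist.headD []).length (0 : Int))

-- ===== PRECONDITION & SPEC =====
-- Pre_ excludes exactly the inputs on which the Python A raises IndexError: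
-- empty vlist (vlist[0]), clist shorter than vlist (clist[i]), or a row shorter
-- than the first row (s[i][j]).
def Pre_linCom (vlist : List (List Int)) (clist : List Int) : Prop :=
  vlist ≠ [] ∧ vlist.length ≤ clist.length ∧
    ∀ v ∈ vlist, (vlist.headD []).length ≤ v.length
instance (vlist : List (List Int)) (clist : List Int) : Decidable (Pre_linCom vlist clist) := by
  unfold Pre_linCom; infer_instance

def pvWitness_linCom : List (List Int) × List Int := ([[1, 2], [3, 4]], [2, 3])

def Spec_linCom (vlist : List (List Int)) (clist : List Int) (out : List Int) : Prop := out = linCom_alt vlist clist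
instance (vlist : List (List Int)) (clist : List Int) (out : List Int) : Decidable (Spec_linCom vlist clist out) := by unfold Spec_linCom; infer_instance

-- ===== CLAIM (what is proved, stated in full; the proofs are below) =====
def Claim_equal_linCom : Prop := ∀ (vlist : List (List Int)) (clist : List Int), Dom_linCom vlist clist → Pre_linCom vlist clist → Spec_linCom vlist clist (linCom vlist clist)

-- ===== LEMMAS AND PROOFS =====

-- B's accumulator after k steps: componentwise partial sums.
lemma linCom_alt_inv (vlist : List (List Int)) (clist : List Int) (m k : Nat) :
    (List.range k).foldl
      (fun result i =>
        let c := clist.getD i 0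
        let v := vlist.getD i []
        (List.range result.length).map (fun j => result.getD j 0 + v.getD j 0 * c))
      (List.replicate m (0 : Int))
    = (List.range m).map (fun j =>
        (List.range k).foldl (fun su i => su + (vlist.getD i []).getD j 0 * clist.getD i 0) 0) := by
  induction k with
  | zero => simp
  | succ k ih =>
      simp only [List.range_succ, List.foldl_append]
      rw [ih]
      simp only [List.foldl_cons, List.foldl_nil, List.length_map, List.length_range]
      refine List.map_congr_left (fun j hj => ?_)
      rw [List.mem_range] at hj
      rw [List.getD_eq_getElem _ _ (by simpa using hj)]
      simp

theorem linCom_spec_aux (vlist : List (List Int)) (clist : List Int)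
    (h : Pre_linCom vlist clist) : linCom vlist clist = linCom_alt vlist clist := by
  obtain ⟨hne, _, hrows⟩ := h
  unfold linCom linCom_alt
  rw [linCom_alt_inv]
  simp only [List.length_map, List.length_range]
  have hn : 0 < vlist.length := List.length_pos_iff.mpr hne
  -- head of s
  have hhead : (((List.range vlist.length).map
      (fun i => scalMulL (vlist.getD i []) (clist.getD i 0))).headD []).length
      = (vlist.headD []).length := by
    obtain ⟨v0, vs, rfl⟩ := List.exists_cons_of_ne_nil hne
    simp [List.range_succ_eq_map, scalMulL]
  rw [hhead]
  refine List.map_congr_left (fun j hj => ?_)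
  rw [List.mem_range] at hj
  refine PySem.List.foldl_congr_mem _ _ _ _ (fun su i hi => ?_)
  rw [List.mem_range] at hi
  have hget : ((List.range vlist.length).map
      (fun i => scalMulL (vlist.getD i []) (clist.getD i 0))).getD i []
      = scalMulL (vlist.getD i []) (clist.getD i 0) := by
    rw [List.getD_eq_getElem _ _ (by simpa using hi)]
    simp
  rw [hget]
  have hmem : vlist.getD i [] ∈ vlist := by
    rw [List.getD_eq_getElem _ _ hi]; exact List.getElem_mem hi
  have hjlt : j < (vlist.getD i []).length := lt_of_lt_of_le hj (hrows _ hmem)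
  simp [scalMulL, List.getElem?_range (show j < (vlist[i]?.getD []).length from hjlt)]

-- ===== VERDICT (by name: the statement is the Claim_ definition above) =====
theorem linCom_spec : Claim_equal_linCom := by
  intro vlist clist _ hpre
  exact linCom_spec_aux vlist clist hpre
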